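-- pv_equiv track=rewrite | github.com/2lambda123/WolframResearch-WolframClientForPython | wolframclient/utils/itertools.py | enumerate_with_last
-- ===== SOURCE A (Python) =====
-- def safe_len(obj):
--     try:
--         return len(obj)
--     except TypeError:
--         return
--
-- def enumerate_with_last(iterable, length = None):
--
--     if length is None:
--         length = safe_len(iterable)
--
--     if length is None:
--         i = 0
--         iterable = iter(iterable)
--         try:
--             prev = next(iterable)
--         except StopIteration:
--             return
--         while True:
--
--             try:
--                 current = next(iterable)
--             except StopIteration:
--                 break
--
--             yield prev, i, False
--
--             prev = current
--
--             i += 1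
--
--         try:
--             yield current, i , True
--         except UnboundLocalError:
--             yield prev, i , True
--
--     else:
--
--         for i, el in enumerate(iterable):
--             yield el, i, i == (length-1)
-- ===== SOURCE B (Python) =====
-- def enumerate_with_last(iterable, length=None):
--     items = list(iterable)
--     n = len(items)
--     k = (n if length is None else length) - 1
--     flags = [False] * n
--     if 0 <= k < n:
--         flags[k] = True
--     for (i, el), f in zip(enumerate(items), flags):
--         yield el, i, f
-- ===== Notes on version B (the rewrite author's own statement) =====
-- stated objective: alternative
-- what changed: B materializes the iterable, precomputes a boolean flag array with the single True slot set once, and zips it with the enumeration, replacing A's streaming one-element-lookahead generator and its per-element flag comparison.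
import Mathlib
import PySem

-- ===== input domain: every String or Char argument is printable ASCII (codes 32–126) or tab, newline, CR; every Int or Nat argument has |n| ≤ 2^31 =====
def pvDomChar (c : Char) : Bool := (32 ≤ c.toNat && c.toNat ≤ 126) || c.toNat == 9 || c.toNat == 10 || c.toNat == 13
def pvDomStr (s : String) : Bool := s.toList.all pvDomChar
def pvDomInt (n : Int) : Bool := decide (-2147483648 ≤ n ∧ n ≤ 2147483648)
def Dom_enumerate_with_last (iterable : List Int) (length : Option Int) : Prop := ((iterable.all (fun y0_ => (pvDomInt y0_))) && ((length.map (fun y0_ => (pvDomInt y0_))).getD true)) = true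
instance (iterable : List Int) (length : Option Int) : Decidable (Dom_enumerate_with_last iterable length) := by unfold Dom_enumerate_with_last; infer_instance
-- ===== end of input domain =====

-- ===== PORT A =====
-- B builds a flag array and zips; A's iterator branch is unreachable for lists (safe_len succeeds), so A reduces to the enumerate branch. Equivalence is about return value; neither mutates arguments.
def enumerate_with_last (iterable : List Int) (length : Option Int) : List (Int × Int × Bool) :=
  -- length = safe_len(iterable) when None; lists always have a len, so the iterator branch is dead code
  let length : Int := match length with | none => (iterable.length : Int) | some l => l
  (PySem.List.enumerate iterable).map (fun p => (p.2, p.1, decide (p.1 = length - 1)))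

-- ===== PORT B =====
def enumerate_with_last_alt (iterable : List Int) (length : Option Int) : List (Int × Int × Bool) :=
  let items := iterable
  let n := items.length
  let k : Int := (match length with | none => (n : Int) | some l => l) - 1
  let flags := List.replicate n false
  let flags := if 0 ≤ k ∧ k < (n : Int) then flags.set k.toNat true else flags
  ((PySem.List.enumerate items).zip flags).map (fun p => (p.1.2, p.1.1, p.2))

-- ===== PRECONDITION & SPEC =====
def Spec_enumerate_with_last (iterable : List Int) (length : Option Int) (out : List (Int × Int × Bool)) : Prop := out = enumerate_with_last_alt iterable length
instance (iterable : List Int) (length : Option Int) (out : List (Int × Int × Bool)) : Decidable (Spec_enumerate_with_last iterable length out) := by unfold Spec_enumerate_with_last; infer_instance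

-- ===== CLAIM (what is proved, stated in full; the proofs are below) =====
def Claim_equal_enumerate_with_last : Prop := ∀ (iterable : List Int) (length : Option Int), Dom_enumerate_with_last iterable length → Spec_enumerate_with_last iterable length (enumerate_with_last iterable length)

-- ===== LEMMAS AND PROOFS =====

lemma ewl_main (xs : List Int) (L : Int) :
    (PySem.List.enumerate xs).map (fun p => (p.2, p.1, decide (p.1 = L - 1))) =
    ((PySem.List.enumerate xs).zip
        (if 0 ≤ L - 1 ∧ L - 1 < (xs.length : Int) then
          (List.replicate xs.length false).set (L - 1).toNat true
        else List.replicate xs.length false)).map (fun p => (p.1.2, p.1.1, p.2)) := by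
  apply List.ext_getElem
  · split_ifs <;>
      simp [List.length_zip, PySem.List.length_enumerate]
  · intro i h1 h2
    have hi : i < xs.length := by
      simpa [PySem.List.length_enumerate] using h1
    split_ifs with hk
    · simp only [List.getElem_map, List.getElem_zip, PySem.List.getElem_enumerate,
        List.getElem_set, List.getElem_replicate]
      refine Prod.ext rfl (Prod.ext rfl ?_)
      by_cases he : (L - 1).toNat = i
      · simp [he]; omega
      · simp; omega
    · simp only [List.getElem_map, List.getElem_zip, PySem.List.getElem_enumerate,
        List.getElem_replicate]
      refine Prod.ext rfl (Prod.ext rfl ?_)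
      simp; omega

-- ===== VERDICT (by name: the statement is the Claim_ definition above) =====
theorem enumerate_with_last_spec : Claim_equal_enumerate_with_last := by
  intro iterable length _
  unfold Spec_enumerate_with_last enumerate_with_last enumerate_with_last_alt
  cases length <;> exact ewl_main _ _
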